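-- pv_equiv track=rewrite | github.com/IbrahimCPS/the42PythonProjects | 42 Projects not mine/HangMan.py | add_char
-- ===== SOURCE A (Python) =====
-- def add_char(word,  index, char="_"):
-- 		count = 0
-- 		new_word = ""
-- 		for ch in word:
-- 				if count == index:
-- 						new_word += char
-- 				else:
-- 				        new_word += ch
-- 				count += 1
-- 		return new_word
-- ===== SOURCE B (Python) =====
-- def add_char(word, index, char="_"):
--     if 0 <= index < len(word):
--         return word[:index] + char + word[index + 1:]
--     return word
-- ===== Notes on version B (the rewrite author's own statement) =====
-- stated objective: simpler
-- what changed: Replaced the counter-driven character-accumulation loop with a single bounds-checked slice splice word[:index] + char + word[index+1:] (out-of-range index returns word unchanged, as in A); slicing avoids the per-character Python loop.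
import Mathlib
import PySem

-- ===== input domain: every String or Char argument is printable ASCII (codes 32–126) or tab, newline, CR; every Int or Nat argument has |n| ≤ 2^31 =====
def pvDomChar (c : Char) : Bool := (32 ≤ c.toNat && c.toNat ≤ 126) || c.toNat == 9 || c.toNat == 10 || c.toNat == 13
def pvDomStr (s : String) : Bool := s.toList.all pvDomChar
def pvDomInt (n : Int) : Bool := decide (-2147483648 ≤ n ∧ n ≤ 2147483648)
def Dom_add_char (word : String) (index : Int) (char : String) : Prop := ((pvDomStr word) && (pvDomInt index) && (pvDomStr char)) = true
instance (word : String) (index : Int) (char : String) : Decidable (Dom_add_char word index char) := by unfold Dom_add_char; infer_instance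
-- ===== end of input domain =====

-- B replaces A's counter-driven accumulation loop with one bounds-checked slice splice; same return value everywhere.
-- ===== PORT A =====
-- A: count = 0; new_word = ""; for ch in word: append char if count == index else ch; count += 1
def add_char (word : String) (index : Int) (char : String) : String :=
  String.ofList
    (word.toList.foldl
      (fun (st : Int × List Char) ch =>
        (st.1 + 1, if st.1 == index then st.2 ++ char.toList else st.2 ++ [ch]))
      (0, [])).2

-- ===== PORT B =====
-- B: if 0 <= index < len(word): return word[:index] + char + word[index+1:] else word
def add_char_alt (word : String) (index : Int) (char : String) : String :=
  if 0 ≤ index ∧ index < (word.toList.length : Int) then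
    String.ofList (PySem.List.slice word.toList none (some index) ++ char.toList
      ++ PySem.List.slice word.toList (some (index + 1)) none)
  else word

-- ===== PRECONDITION & SPEC =====
def Spec_add_char (word : String) (index : Int) (char : String) (out : String) : Prop := out = add_char_alt word index char
instance (word : String) (index : Int) (char : String) (out : String) : Decidable (Spec_add_char word index char out) := by unfold Spec_add_char; infer_instance

-- ===== CLAIM (what is proved, stated in full; the proofs are below) =====
def Claim_equal_add_char : Prop := ∀ (word : String) (index : Int) (char : String), Dom_add_char word index char → Spec_add_char word index char (add_char word index char)

-- ===== LEMMAS AND PROOFS =====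

-- ===== VERDICT (by name: the statement is the Claim_ definition above) =====
-- rep xs i cl: xs with the element at offset i replaced by cl (unchanged if i out of range)
def pvRep (xs : List Char) (i : Int) (cl : List Char) : List Char :=
  match xs with
  | [] => []
  | x :: t => (if i = 0 then cl else [x]) ++ pvRep t (i - 1) cl

theorem pv_foldl_rep (xs : List Char) (index : Int) (cl : List Char) :
    ∀ (c : Int) (acc : List Char),
    (xs.foldl (fun (st : Int × List Char) ch =>
        (st.1 + 1, if st.1 == index then st.2 ++ cl else st.2 ++ [ch])) (c, acc)).2
      = acc ++ pvRep xs (index - c) cl := by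
  induction xs with
  | nil => intro c acc; simp [pvRep]
  | cons x t ih =>
    intro c acc
    simp only [List.foldl_cons, pvRep]
    rw [ih]
    by_cases h : c = index
    · simp [h]
    · have h1 : (c == index) = false := by simp [h]
      have h2 : ¬ (index - c = 0) := by omega
      simp [h1, h2, sub_sub]

theorem pv_rep_out (xs : List Char) (i : Int) (cl : List Char)
    (h : i < 0 ∨ (xs.length : Int) ≤ i) : pvRep xs i cl = xs := by
  induction xs generalizing i with
  | nil => simp [pvRep]
  | cons x t ih =>
    have h0 : ¬ (i = 0) := by simp at h; omega
    simp only [pvRep, h0, if_false]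
    rw [ih]
    · simp
    · simp at h ⊢; omega

theorem pv_rep_in (xs : List Char) (n : ℕ) (cl : List Char) (h : n < xs.length) :
    pvRep xs (n : Int) cl = xs.take n ++ cl ++ xs.drop (n + 1) := by
  induction xs generalizing n with
  | nil => simp at h
  | cons x t ih =>
    cases n with
    | zero =>
      have : (0 - 1 : Int) = -1 := by omega
      simp [pvRep, this, pv_rep_out t (-1) cl (by omega)]
    | succ m =>
      have h0 : ¬ ((((m : ℕ) + 1 : ℕ) : Int) = 0) := by omega
      have : (((m + 1 : ℕ) : Int) - 1) = (m : Int) := by omega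
      simp only [pvRep, h0, if_false, this]
      rw [ih m (by simpa using h)]
      simp

-- ===== VERDICT (by name: the statement is the Claim_ definition above) =====
theorem add_char_spec : Claim_equal_add_char := by
  intro word index char _
  unfold Spec_add_char add_char add_char_alt
  rw [pv_foldl_rep word.toList index char.toList 0 []]
  simp only [sub_zero, List.nil_append]
  by_cases h : 0 ≤ index ∧ index < (word.toList.length : Int)
  · obtain ⟨h1, h2⟩ := h
    obtain ⟨n, rfl⟩ := Int.eq_ofNat_of_zero_le h1
    have hn : n < word.toList.length := by exact_mod_cast h2
    have hcast : ((n : Int) + 1) = (((n + 1 : ℕ)) : Int) := by push_cast; ring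
    rw [if_pos ⟨h1, h2⟩, pv_rep_in word.toList n char.toList hn, hcast,
      PySem.List.slice_to_natCast, PySem.List.slice_from_natCast]
  · rw [if_neg h, pv_rep_out word.toList index char.toList (by omega)]
    exact String.ofList_toList
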